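-- pv_equiv track=rewrite | github.com/ketkimnaik/Algorithms | 11_Container_With_Most_Water.py | solve
-- ===== SOURCE A (Python) =====
-- def solve(a):
--     l=len(a)
--     area = a[0]*1
--     for i in range(0,l):
--         for j in range(0,l):
--             c=abs(j-i)
--             if a[i] < a[j]:
--                 area1= a[i] * c
--                 if area1 > area:
--                     area = area1
--     return area
-- ===== SOURCE B (Python) =====
-- def _least(pred, lo, hi):
--     # smallest k in [lo, hi) with pred(k), assuming pred is monotone; hi if none
--     while lo < hi:
--         mid = (lo + hi) // 2
--         if pred(mid):
--             hi = mid
--         else: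
--             lo = mid + 1
--     return lo
--
--
-- def _prev_greater_dist(a):
--     # for each i: distance to the nearest j < i with a[j] > a[i], or None
--     st = []
--     out = []
--     for i in range(len(a)):
--         x = a[i]
--         while st and a[st[-1]] <= x:
--             st.pop()
--         out.append(i - st[-1] if st else None)
--         st.append(i)
--     return out
--
--
-- def solve(a):
--     n = len(a)
--     best = a[0]
--     # prefix maxima and suffix maxima
--     pm = []
--     m = a[0]
--     for x in a:
--         if x > m:
--             m = x
--         pm.append(m)
--     sm_rev = []
--     m = a[-1]
--     for x in a[::-1]:
--         if x > m:
--             m = x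
--         sm_rev.append(m)
--     sm = sm_rev[::-1]
--     # nearest strictly-greater distances, both sides
--     pgd = _prev_greater_dist(a)
--     ngd = _prev_greater_dist(a[::-1])[::-1]
--     top = sm[0]
--     for i in range(n):
--         x = a[i]
--         if x >= top:
--             continue  # no strictly greater element exists
--         if x >= 0:
--             # furthest strictly greater element: extreme indices of {j : a[j] > x}
--             lo = _least(lambda k: pm[k] > x, 0, n)
--             hi = _least(lambda k: sm[k] <= x, 0, n) - 1
--             d = max(i - lo, hi - i)
--         else:
--             dl = pgd[i]
--             dr = ngd[i]
--             d = dl if dr is None else (dr if dl is None else min(dl, dr))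
--         cand = x * d
--         if cand > best:
--             best = cand
--     return best
-- ===== Notes on version B (the rewrite author's own statement) =====
-- stated objective: faster
-- what changed: Replaced A's all-pairs double loop by prefix/suffix maxima with binary searches (furthest strictly-greater index, used for nonnegative a[i]) plus monotonic-stack nearest-strictly-greater distances (used for negative a[i]), taking the best per-element candidate in closed form.
import Mathlib
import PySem

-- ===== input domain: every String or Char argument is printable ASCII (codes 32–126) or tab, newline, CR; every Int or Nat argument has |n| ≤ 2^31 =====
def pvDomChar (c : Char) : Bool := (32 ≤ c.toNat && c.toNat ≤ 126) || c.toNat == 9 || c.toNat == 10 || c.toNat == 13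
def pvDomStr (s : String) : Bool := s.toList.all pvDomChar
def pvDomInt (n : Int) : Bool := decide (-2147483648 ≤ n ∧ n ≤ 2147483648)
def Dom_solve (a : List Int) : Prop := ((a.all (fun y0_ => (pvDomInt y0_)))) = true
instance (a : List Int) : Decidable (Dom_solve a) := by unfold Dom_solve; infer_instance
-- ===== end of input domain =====

-- B replaces A's all-pairs O(n^2) scan by prefix/suffix maxima with binary search
-- (furthest strictly-greater index, used when a[i] ≥ 0) plus monotonic-stack
-- nearest-strictly-greater distances (used when a[i] < 0): faster by algorithm change.

-- ===== PORT A =====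
def solve (a : List Int) : Int :=
  let l : Int := (a.length : Int)
  let area : Int := PySem.List.pyGetD a 0 0 * 1
  (PySem.List.pyRange 0 l 1).foldl (fun area i =>
    (PySem.List.pyRange 0 l 1).foldl (fun area j =>
      let c : Int := |j - i|
      if PySem.List.pyGetD a i 0 < PySem.List.pyGetD a j 0 then
        let area1 := PySem.List.pyGetD a i 0 * c
        if area1 > area then area1 else area
      else area) area) area

-- ===== PORT B =====
-- Source B's _least: smallest k in [lo, hi) with pred k (pred monotone), hi if none
def bsLeast (pred : Nat → Bool) (lo hi : Nat) : Nat :=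
  if h : lo < hi then
    let mid := (lo + hi) / 2
    if pred mid then bsLeast pred lo mid else bsLeast pred (mid + 1) hi
  else lo
termination_by hi - lo
decreasing_by all_goals simp only [mid] at *; omega

-- Source B's _prev_greater_dist: per index, distance to nearest previous strictly
-- greater element (stack kept head-first; the while/pop loop is dropWhile)
def prevGreaterDist (a : List Int) : List (Option Int) :=
  ((List.range a.length).foldl (fun (s : List Nat × List (Option Int)) i =>
      let x := a.getD i 0
      let st := s.1.dropWhile (fun j => decide (a.getD j 0 ≤ x))
      (i :: st, s.2 ++ [st.head?.map (fun (j : Nat) => (i : Int) - (j : Int))])) ([], [])).2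

def solve_alt (a : List Int) : Int :=
  let n := a.length
  let pm : List Int := (a.foldl (fun (s : List Int × Int) x =>
      let m := if x > s.2 then x else s.2
      (s.1 ++ [m], m)) ([], a.getD 0 0)).1
  let sm : List Int := ((a.reverse.foldl (fun (s : List Int × Int) x =>
      let m := if x > s.2 then x else s.2
      (s.1 ++ [m], m)) ([], a.reverse.getD 0 0)).1).reverse
  let pgd := prevGreaterDist a
  let ngd := (prevGreaterDist a.reverse).reverse
  let top := sm.getD 0 0
  (List.range n).foldl (fun best i =>
    let x := a.getD i 0
    if x ≥ top then best
    else
      let d : Int :=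
        if x ≥ 0 then
          let lo := bsLeast (fun k => decide (pm.getD k 0 > x)) 0 n
          let hi : Int := (bsLeast (fun k => decide (sm.getD k 0 ≤ x)) 0 n : Int) - 1
          max ((i : Int) - (lo : Int)) (hi - (i : Int))
        else
          match pgd.getD i none, ngd.getD i none with
          | some dl, none => dl
          | none, some dr => dr
          | some dl, some dr => min dl dr
          | none, none => 0   -- unreachable: x < top guarantees a strictly greater neighbour side
      let cand := x * d
      if cand > best then cand else best) (a.getD 0 0)

-- ===== PRECONDITION & SPEC =====
-- A evaluates a[0] unconditionally: the empty list raises IndexError and is excluded.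
def Pre_solve (a : List Int) : Prop := a ≠ []
instance (a : List Int) : Decidable (Pre_solve a) := by unfold Pre_solve; infer_instance
def pvWitness_solve : List Int := [3, -1, 4, 1, -5]

def Spec_solve (a : List Int) (out : Int) : Prop := out = solve_alt a
instance (a : List Int) (out : Int) : Decidable (Spec_solve a out) := by unfold Spec_solve; infer_instance

-- ===== CLAIM (what is proved, stated in full; the proofs are below) =====
def Claim_equal_solve : Prop := ∀ (a : List Int), Dom_solve a → Pre_solve a → Spec_solve a (solve a)
def gv (a : List Int) (i : Nat) : Int := a.getD i 0
def distI (i j : Nat) : Int := |(j:Int) - (i:Int)|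
def gtIdx (a : List Int) (i : Nat) : List Nat :=
  (List.range a.length).filter (fun j => decide (gv a i < gv a j))

theorem ite_max (v acc : Int) : (if v > acc then v else acc) = max acc v := by
  by_cases h : v > acc <;> simp [max_def] <;> omega

theorem A_norm (a : List Int) :
    solve a = (List.range a.length).foldl
      (fun acc i => ((gtIdx a i).map (fun j => gv a i * distI i j)).foldl max acc)
      (gv a 0) := by
  unfold solve
  dsimp only
  rw [PySem.List.pyRange_zero_nat]
  simp only [List.foldl_map, PySem.List.pyGetD_natCast, PySem.List.pyGetD_zero, mul_one]
  apply PySem.List.foldl_congr_mem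
  intro acc i _
  have h1 : ∀ (area : Int) (j : Nat),
      (if a.getD i 0 < a.getD j 0 then
        (if a.getD i 0 * |(j:Int) - (i:Int)| > area then a.getD i 0 * |(j:Int) - (i:Int)| else area)
       else area)
      = (if gv a i < gv a j then max area (gv a i * distI i j) else area) := by
    intro area j
    rw [ite_max]; rfl
  calc (List.range a.length).foldl (fun area j =>
          (if a.getD i 0 < a.getD j 0 then
            (if a.getD i 0 * |(j:Int) - (i:Int)| > area then a.getD i 0 * |(j:Int) - (i:Int)| else area)
           else area)) acc
      = (List.range a.length).foldl (fun area j => if gv a i < gv a j then max area (gv a i * distI i j) else area) acc := by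
        exact PySem.List.foldl_congr_mem _ _ _ _ (fun acc => fun x _ => h1 acc x)
    _ = (gtIdx a i).foldl (fun area j => max area (gv a i * distI i j)) acc := by
        rw [PySem.List.foldl_ite_eq_foldl_filter]; rfl
    _ = ((gtIdx a i).map (fun j => gv a i * distI i j)).foldl max acc := by
        exact List.foldl_map.symm
  exact List.foldl_map

-- running-max scan: the (pm, m) fold of solve_alt in closed form
def scanlMax : List Int → Int → List Int
  | [], _ => []
  | x :: t, m => (max m x) :: scanlMax t (max m x)

theorem foldl_pm (l : List Int) (acc : List Int) (m : Int) :
    l.foldl (fun (s : List Int × Int) x =>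
      let m := if x > s.2 then x else s.2
      (s.1 ++ [m], m)) (acc, m)
    = (acc ++ scanlMax l m, l.foldl max m) := by
  induction l generalizing acc m with
  | nil => simp [scanlMax]
  | cons x t ih =>
    have hx : (if x > m then x else m) = max m x := by
      by_cases h : x > m <;> simp [max_def] <;> omega
    simp only [List.foldl_cons, scanlMax, hx, ih]
    simp

theorem foldl_pm0 (l : List Int) (m : Int) :
    l.foldl (fun (s : List Int × Int) x =>
      let m := if x > s.2 then x else s.2
      (s.1 ++ [m], m)) ([], m)
    = (scanlMax l m, l.foldl max m) := by
  rw [foldl_pm]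
  simp

theorem scanlMax_length (l : List Int) (m : Int) : (scanlMax l m).length = l.length := by
  induction l generalizing m with
  | nil => rfl
  | cons x t ih => simp [scanlMax, ih]

theorem scanlMax_getD (l : List Int) (m : Int) (j : Nat) (hj : j < l.length) :
    (scanlMax l m).getD j 0 = (l.take (j + 1)).foldl max m := by
  induction l generalizing m j with
  | nil => simp at hj
  | cons x t ih =>
    cases j with
    | zero => simp [scanlMax]
    | succ k =>
      simp only [scanlMax, List.getD_cons_succ, List.take_succ_cons, List.foldl_cons]
      exact ih (max m x) k (by simpa using hj)

-- closed forms of the pm / sm entries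
def pmv (a : List Int) (j : Nat) : Int := (a.take (j + 1)).foldl max (a.getD 0 0)
def smv (a : List Int) (j : Nat) : Int :=
  (a.reverse.take (a.length - j)).foldl max (a.reverse.getD 0 0)

theorem pmv_bound (a : List Int) (j k : Nat) (hk : k ≤ j) (hj : j < a.length) :
    a.getD k 0 ≤ pmv a j := by
  have hkn : k < a.length := lt_of_le_of_lt hk hj
  have hmem : a.getD k 0 ∈ a.take (j + 1) := by
    rw [List.getD_eq_getElem a 0 hkn]
    have : (a.take (j+1))[k]'(by simp; omega) = a[k] := List.getElem_take
    rw [← this]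
    exact List.getElem_mem _
  exact (PySem.List.le_foldl_max _ _).2 _ hmem

theorem pmv_attain (a : List Int) (j : Nat) (_hj : j < a.length) :
    ∃ k, k ≤ j ∧ pmv a j = a.getD k 0 := by
  rcases PySem.List.foldl_max_mem (a.take (j+1)) (a.getD 0 0) with h | h
  · exact ⟨0, Nat.zero_le _, h⟩
  · rcases List.mem_iff_getElem.1 h with ⟨k, hk, hval⟩
    have hkn : k < a.length := by have := a.length_take_le (j+1); simp at hk; omega
    refine ⟨k, by simp at hk; omega, ?_⟩
    rw [List.getD_eq_getElem a 0 hkn]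
    show pmv a j = a[k]
    unfold pmv
    rw [← hval]
    exact List.getElem_take

theorem drop_rev (a : List Int) (j : Nat) (hj : j ≤ a.length) :
    a.reverse.take (a.length - j) = (a.drop j).reverse := by
  rw [List.take_reverse]
  congr 1
  congr 1
  omega

theorem rev_getD0 (a : List Int) (h : a ≠ []) :
    a.reverse.getD 0 0 = a.getD (a.length - 1) 0 := by
  have h1 : 0 < a.length := List.length_pos_of_ne_nil h
  rw [List.getD_eq_getElem _ 0 (by simpa using h1), List.getD_eq_getElem a 0 (by omega)]
  simp [List.getElem_reverse]

theorem smv_bound (a : List Int) (j k : Nat) (hjk : j ≤ k) (hk : k < a.length) :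
    a.getD k 0 ≤ smv a j := by
  unfold smv
  rw [drop_rev a j (by omega)]
  apply (PySem.List.le_foldl_max _ _).2
  rw [List.mem_reverse, List.getD_eq_getElem a 0 hk]
  rw [List.mem_iff_getElem]
  refine ⟨k - j, by simp; omega, ?_⟩
  rw [List.getElem_drop]
  congr 1
  omega

theorem smv_attain (a : List Int) (j : Nat) (hj : j < a.length) :
    ∃ k, j ≤ k ∧ k < a.length ∧ smv a j = a.getD k 0 := by
  have hne : a ≠ [] := by intro h; rw [h] at hj; simp at hj
  unfold smv
  rw [drop_rev a j (by omega), rev_getD0 a hne]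
  rcases PySem.List.foldl_max_mem ((a.drop j).reverse) (a.getD (a.length - 1) 0) with h | h
  · exact ⟨a.length - 1, by omega, by omega, h⟩
  · rw [List.mem_reverse] at h
    rcases List.mem_iff_getElem.1 h with ⟨k, hk, hval⟩
    simp only [List.length_drop] at hk
    refine ⟨j + k, by omega, by omega, ?_⟩
    calc List.foldl max (a.getD (a.length - 1) 0) (List.drop j a).reverse
        = (a.drop j)[k] := hval.symm
      _ = a[j + k]'(by omega) := List.getElem_drop
      _ = a.getD (j + k) 0 := (List.getD_eq_getElem a 0 (by omega)).symm

theorem bsLeast_spec (pred : Nat → Bool) (lo hi : Nat) (hlh : lo ≤ hi)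
    (mono : ∀ j k, lo ≤ j → j ≤ k → k < hi → pred j = true → pred k = true) :
    lo ≤ bsLeast pred lo hi ∧ bsLeast pred lo hi ≤ hi ∧
    (∀ k, lo ≤ k → k < bsLeast pred lo hi → pred k = false) ∧
    (bsLeast pred lo hi < hi → pred (bsLeast pred lo hi) = true) := by
  revert hlh mono
  fun_induction bsLeast pred lo hi with
  | case1 lo hi h mid hp ih =>
    intro hlh mono
    have hmid : mid = (lo + hi) / 2 := rfl
    obtain ⟨h1, h2, h3, h4⟩ := ih (by omega) (fun j k hj hjk hk => mono j k hj hjk (by omega))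
    refine ⟨h1, by omega, h3, fun _ => ?_⟩
    rcases lt_or_eq_of_le h2 with hlt | heq
    · exact h4 hlt
    · rw [heq]; exact hp
  | case2 lo hi h mid hp ih =>
    intro hlh mono
    have hmid : mid = (lo + hi) / 2 := rfl
    obtain ⟨h1, h2, h3, h4⟩ := ih (by omega) (fun j k hj hjk hk => mono j k (by omega) hjk hk)
    refine ⟨by omega, h2, ?_, h4⟩
    intro k hk1 hk2
    rcases Nat.lt_or_ge k (mid + 1) with hc | hc
    · rcases Bool.eq_false_or_eq_true (pred k) with ht | hf
      · exact absurd (mono k mid hk1 (by omega) (by omega) ht) hp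
      · exact hf
    · exact h3 k hc hk2
  | case3 lo hi h =>
    intro hlh mono
    exact ⟨le_refl _, by omega, fun k h1 h2 => by omega, fun hc => by omega⟩

theorem dropWhile_eq_filter_of_pw {α : Type} (p : α → Bool) (l : List α)
    (h : l.Pairwise (fun x y => p x = false → p y = false)) :
    l.dropWhile p = l.filter (fun x => !p x) := by
  induction l with
  | nil => rfl
  | cons x t ih =>
    rcases List.pairwise_cons.1 h with ⟨hx, ht⟩
    rcases Bool.eq_false_or_eq_true (p x) with htr | hfa
    · simp [htr, ih ht]
    · have hft : t.filter (fun x => !p x) = t := List.filter_eq_self.2 (fun y hy => by simp [hx y hy hfa])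
      simp [hfa, hft]

theorem getLast?_sorted_eq_some {l : List Nat} (hl : l.Pairwise (· < ·)) (J : Nat)
    (hmem : J ∈ l) (hub : ∀ x ∈ l, x ≤ J) : l.getLast? = some J := by
  induction l with
  | nil => simp at hmem
  | cons x t ih =>
    rcases List.pairwise_cons.1 hl with ⟨hx, ht⟩
    cases t with
    | nil => simp at hmem ⊢; omega
    | cons y u =>
      rw [List.getLast?_cons_cons]
      have hJt : J ∈ y :: u := by
        rcases List.mem_cons.1 hmem with rfl | h
        · exact absurd (hub y (by simp)) (by have := hx y (by simp); omega)
        · exact h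
      exact ih ht hJt (fun z hz => hub z (List.mem_cons_of_mem _ hz))

def keepB (a : List Int) (i : Nat) : Nat → Bool :=
  fun j => decide (∀ k ∈ List.range i, j < k → a.getD k 0 < a.getD j 0)
def gtBelow (a : List Int) (i : Nat) : List Nat :=
  (List.range i).filter (fun j => decide (a.getD i 0 < a.getD j 0))
def pgdS (a : List Int) (i : Nat) : Option Int :=
  (gtBelow a i).getLast?.map (fun (J : Nat) => (i : Int) - (J : Int))

theorem pairwise_keep (a : List Int) (i : Nat) :
    ((List.range i).filter (keepB a i)).Pairwise
      (fun j1 j2 => a.getD j2 0 < a.getD j1 0) := by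
  rw [List.pairwise_filter]
  rw [List.pairwise_iff_getElem]
  intro p q hp hq hpq h1 h2
  simp only [List.length_range] at hp hq
  simp only [List.getElem_range] at h1 h2 ⊢
  have := (of_decide_eq_true h1) q (List.mem_range.2 hq) hpq
  exact this

theorem filter_gtlast (a : List Int) (i : Nat) :
    ((List.range i).filter (fun j => keepB a i j && decide (a.getD i 0 < a.getD j 0))).getLast?
      = (gtBelow a i).getLast? := by
  rcases h : (gtBelow a i).getLast? with _ | J
  · rw [List.getLast?_eq_none_iff] at h ⊢
    unfold gtBelow at h
    rw [List.filter_eq_nil_iff] at h ⊢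
    intro j hj
    simp only [Bool.and_eq_true, not_and]
    intro _ hgt
    exact absurd hgt (h j hj)
  · have hne : gtBelow a i ≠ [] := by rintro he; rw [he] at h; simp at h
    have hlast : (gtBelow a i).getLast hne = J := by
      rw [List.getLast?_eq_some_getLast hne] at h
      exact Option.some_inj.1 h.symm |>.symm ▸ (Option.some_inj.1 h).symm
    have hmem : J ∈ gtBelow a i := hlast ▸ List.getLast_mem hne
    have hsorted : (gtBelow a i).Pairwise (· < ·) :=
      List.Pairwise.filter _ (List.pairwise_lt_range)
    have hub : ∀ x ∈ gtBelow a i, x ≤ J := by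
      intro x hx
      rcases List.mem_iff_getElem.1 hx with ⟨p, hp, rfl⟩
      rw [← hlast, List.getLast_eq_getElem]
      rcases Nat.lt_or_ge p ((gtBelow a i).length - 1) with hc | hc
      · exact le_of_lt (List.pairwise_iff_getElem.1 hsorted _ _ _ _ hc)
      · have : p = (gtBelow a i).length - 1 := by omega
        subst this; exact le_refl _
    have hmf : J ∈ List.range i ∧ decide (a.getD i 0 < a.getD J 0) = true := by
      unfold gtBelow at hmem
      exact List.mem_filter.1 hmem
    have hJlt : a.getD i 0 < a.getD J 0 := of_decide_eq_true hmf.2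
    have hkeep : keepB a i J = true := by
      apply decide_eq_true
      intro k hk hJk
      have hknot : k ∉ gtBelow a i := by
        intro hin
        have := hub k hin
        have : J < k := hJk
        omega
      have hnot : ¬ (a.getD i 0 < a.getD k 0) := by
        intro hgt
        exact hknot (List.mem_filter.2 ⟨hk, decide_eq_true hgt⟩)
      omega
    apply getLast?_sorted_eq_some
    · exact List.Pairwise.filter _ (List.pairwise_lt_range)
    · exact List.mem_filter.2 ⟨hmf.1, by simp [hkeep]; exact hJlt⟩
    · intro x hx
      apply hub
      rcases List.mem_filter.1 hx with ⟨hxr, hxq⟩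
      simp only [Bool.and_eq_true] at hxq
      exact List.mem_filter.2 ⟨hxr, hxq.2⟩

theorem pg_fold_inv (a : List Int) (i : Nat) :
    ((List.range i).foldl (fun (s : List Nat × List (Option Int)) i =>
      let x := a.getD i 0
      let st := s.1.dropWhile (fun j => decide (a.getD j 0 ≤ x))
      (i :: st, s.2 ++ [st.head?.map (fun (j : Nat) => (i : Int) - (j : Int))])) ([], []))
    = (((List.range i).filter (keepB a i)).reverse, (List.range i).map (pgdS a)) := by
  induction i with
  | zero => simp
  | succ m ih =>
    rw [List.range_succ, List.foldl_append, ih]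
    simp only [List.foldl_cons, List.foldl_nil]
    -- the dropWhile step
    have hpw : (((List.range m).filter (keepB a m)).reverse).Pairwise
        (fun j1 j2 => (decide (a.getD j1 0 ≤ a.getD m 0) = false) →
                      (decide (a.getD j2 0 ≤ a.getD m 0) = false)) := by
      rw [List.pairwise_reverse]
      apply (pairwise_keep a m).imp
      intro j1 j2 hlt h2
      simp only [decide_eq_false_iff_not, not_le] at h2 ⊢
      omega
    have hdrop : (((List.range m).filter (keepB a m)).reverse).dropWhile
          (fun j => decide (a.getD j 0 ≤ a.getD m 0))
        = (((List.range m).filter (keepB a m)).filter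
            (fun j => !decide (a.getD j 0 ≤ a.getD m 0))).reverse := by
      rw [dropWhile_eq_filter_of_pw _ _ hpw, List.filter_reverse]
    have hff : ((List.range m).filter (keepB a m)).filter
            (fun j => !decide (a.getD j 0 ≤ a.getD m 0))
        = (List.range m).filter (fun j => keepB a m j && decide (a.getD m 0 < a.getD j 0)) := by
      rw [List.filter_filter]
      apply List.filter_congr
      intro j hj
      rw [Bool.and_comm]
      congr 1
      rw [← decide_not]
      exact decide_eq_decide.2 Int.not_le
    -- the new keep predicate on range m
    have hkeepstep : ∀ j ∈ List.range m,
        (keepB a m j && decide (a.getD m 0 < a.getD j 0)) = keepB a (m+1) j := by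
      intro j hj
      have hjm : j < m := List.mem_range.1 hj
      rcases Bool.eq_false_or_eq_true (keepB a (m+1) j) with ht | hf
      · rw [ht]
        have hall := of_decide_eq_true ht
        simp only [Bool.and_eq_true]
        constructor
        · apply decide_eq_true
          intro k hk hjk
          exact hall k (by rw [List.mem_range] at hk ⊢; omega) hjk
        · exact decide_eq_true (hall m (List.mem_range.2 (by omega)) hjm)
      · rw [hf]
        have hnall := of_decide_eq_false hf
        simp only [not_forall] at hnall
        rcases hnall with ⟨k, hk, hjk, hnlt⟩
        rw [List.mem_range] at hk
        rcases Nat.lt_or_ge k m with hkm | hkm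
        · -- the failure is inside range m : keepB a m j is false
          simp only [Bool.and_eq_false_iff]
          left
          apply decide_eq_false
          simp only [not_forall]
          exact ⟨k, List.mem_range.2 hkm, hjk, hnlt⟩
        · -- k = m : the new element fails
          have : k = m := by omega
          subst this
          simp only [decide_eq_false hnlt, Bool.and_false]
    have hfilter : (List.range (m+1)).filter (keepB a (m+1))
        = ((List.range m).filter (fun j => keepB a m j && decide (a.getD m 0 < a.getD j 0))) ++ [m] := by
      rw [List.range_succ, List.filter_append, List.filter_congr hkeepstep]
      congr 1
      simp only [List.filter_cons, List.filter_nil]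
      rw [if_pos]
      apply decide_eq_true
      intro k hk hmk
      rw [List.mem_range] at hk
      omega
    simp only [Prod.mk.injEq]
    constructor
    · -- stack component
      rw [show List.range m ++ [m] = List.range (m+1) from (List.range_succ).symm]
      rw [hfilter, List.reverse_append]
      simp only [List.reverse_cons, List.reverse_nil, List.nil_append, List.singleton_append]
      rw [hdrop, hff]
    · -- output component
      rw [List.map_append]
      congr 1
      rw [hdrop]
      simp only [List.head?_reverse]
      rw [hff, filter_gtlast]
      simp [pgdS]

theorem prevGreaterDist_eq (a : List Int) :
    prevGreaterDist a = (List.range a.length).map (pgdS a) := by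
  unfold prevGreaterDist
  rw [pg_fold_inv]

theorem mem_gtBelow (a : List Int) (i j : Nat) :
    j ∈ gtBelow a i ↔ j < i ∧ a.getD i 0 < a.getD j 0 := by
  unfold gtBelow
  simp [List.mem_filter, List.mem_range]

theorem sorted_getLast?_ub {l : List Nat} (hl : l.Pairwise (· < ·)) {J : Nat}
    (h : l.getLast? = some J) : ∀ x ∈ l, x ≤ J := by
  intro x hx
  have hne : l ≠ [] := by rintro rfl; simp at h
  have hlast : l.getLast hne = J := by
    rw [List.getLast?_eq_some_getLast hne] at h
    exact Option.some_inj.1 h.symm |>.symm ▸ (Option.some_inj.1 h).symm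
  rcases List.mem_iff_getElem.1 hx with ⟨p, hp, rfl⟩
  rw [← hlast, List.getLast_eq_getElem]
  rcases Nat.lt_or_ge p (l.length - 1) with hc | hc
  · exact le_of_lt (List.pairwise_iff_getElem.1 hl _ _ _ _ hc)
  · have : p = l.length - 1 := by omega
    subst this; exact le_refl _

theorem pgdS_none_iff (a : List Int) (i : Nat) :
    pgdS a i = none ↔ ∀ j, j < i → a.getD j 0 ≤ a.getD i 0 := by
  unfold pgdS
  rcases hgl : (gtBelow a i).getLast? with _ | J
  · rw [List.getLast?_eq_none_iff] at hgl
    unfold gtBelow at hgl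
    rw [List.filter_eq_nil_iff] at hgl
    simp only [Option.map_none, true_iff]
    intro j hj
    have := hgl j (List.mem_range.2 hj)
    simp only [decide_eq_true_eq] at this
    omega
  · simp only [Option.map_some]
    constructor
    · intro h; simp at h
    · intro h
      exfalso
      have hmem := List.mem_of_mem_getLast? hgl
      rcases (mem_gtBelow a i J).1 hmem with ⟨hJi, hJgt⟩
      have := h J hJi
      omega

theorem pgdS_some (a : List Int) (i : Nat) (d : Int) (h : pgdS a i = some d) :
    ∃ J, J < i ∧ a.getD i 0 < a.getD J 0 ∧ d = (i : Int) - (J : Int) ∧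
      ∀ j, J < j → j < i → a.getD j 0 ≤ a.getD i 0 := by
  unfold pgdS at h
  rcases hgl : (gtBelow a i).getLast? with _ | J
  · rw [hgl] at h; simp at h
  · rw [hgl] at h
    simp only [Option.map_some, Option.some_inj] at h
    have hsorted : (gtBelow a i).Pairwise (· < ·) :=
      List.Pairwise.filter _ (List.pairwise_lt_range)
    have hmem := List.mem_of_mem_getLast? hgl
    rcases (mem_gtBelow a i J).1 hmem with ⟨hJi, hJgt⟩
    refine ⟨J, hJi, hJgt, h.symm, ?_⟩
    intro j hJj hji
    by_contra hgt
    have hjmem : j ∈ gtBelow a i := (mem_gtBelow a i j).2 ⟨hji, by omega⟩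
    have := sorted_getLast?_ub hsorted hgl j hjmem
    omega

theorem getD_reverse {α : Type} (l : List α) (d : α) (i : Nat) (h : i < l.length) :
    l.reverse.getD i d = l.getD (l.length - 1 - i) d := by
  rw [List.getD_eq_getElem _ d (by simpa using h), List.getD_eq_getElem _ d (by omega)]
  rw [List.getElem_reverse]

theorem ngd_entry (a : List Int) (i : Nat) (h : i < a.length) :
    ((prevGreaterDist a.reverse).reverse).getD i none = pgdS a.reverse (a.length - 1 - i) := by
  have hlen : (prevGreaterDist a.reverse).length = a.length := by
    rw [prevGreaterDist_eq]; simp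
  rw [getD_reverse _ _ _ (by omega), prevGreaterDist_eq]
  simp only [List.length_reverse]
  have h2 : a.length - 1 - i < a.length := by omega
  simp only [List.length_map, List.length_range]
  exact PySem.List.getD_map_range _ _ _ _ h2

theorem ngd_none_iff (a : List Int) (i : Nat) (h : i < a.length) :
    pgdS a.reverse (a.length - 1 - i) = none ↔
      ∀ j, i < j → j < a.length → a.getD j 0 ≤ a.getD i 0 := by
  rw [pgdS_none_iff]
  have hii : a.reverse.getD (a.length - 1 - i) 0 = a.getD i 0 := by
    rw [getD_reverse _ _ _ (by omega)]
    congr 1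
    omega
  constructor
  · intro hall j hij hjn
    have hj' : a.length - 1 - j < a.length - 1 - i := by omega
    have := hall (a.length - 1 - j) hj'
    rw [hii, getD_reverse _ _ _ (by omega)] at this
    rw [show a.length - 1 - (a.length - 1 - j) = j by omega] at this
    exact this
  · intro hall j' hj'
    rw [hii, getD_reverse _ _ _ (by omega)]
    exact hall (a.length - 1 - j') (by omega) (by omega)

theorem ngd_some (a : List Int) (i : Nat) (d : Int) (h : i < a.length)
    (hs : pgdS a.reverse (a.length - 1 - i) = some d) :
    ∃ J, i < J ∧ J < a.length ∧ a.getD i 0 < a.getD J 0 ∧ d = (J : Int) - (i : Int) ∧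
      ∀ j, i < j → j < J → a.getD j 0 ≤ a.getD i 0 := by
  rcases pgdS_some _ _ _ hs with ⟨J', hJ'lt, hJ'gt, hd, hmid⟩
  have hii : a.reverse.getD (a.length - 1 - i) 0 = a.getD i 0 := by
    rw [getD_reverse _ _ _ (by omega)]
    congr 1
    omega
  have hJn : J' < a.length := by omega
  have hJJ : a.reverse.getD J' 0 = a.getD (a.length - 1 - J') 0 :=
    getD_reverse _ _ _ (by simpa using hJn)
  refine ⟨a.length - 1 - J', by omega, by omega, ?_, ?_, ?_⟩
  · rw [hii, hJJ] at hJ'gt; exact hJ'gt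
  · rw [hd]; omega
  · intro j hij hjJ
    have := hmid (a.length - 1 - j) (by omega) (by omega)
    rw [hii, getD_reverse _ _ _ (by omega)] at this
    rw [show a.length - 1 - (a.length - 1 - j) = j by omega] at this
    exact this

theorem mem_gtIdx (a : List Int) (i j : Nat) :
    j ∈ gtIdx a i ↔ j < a.length ∧ gv a i < gv a j := by
  unfold gtIdx
  simp [List.mem_filter, List.mem_range]

theorem foldl_max_eq (xs : List Int) (acc b : Int) (hmem : b ∈ xs)
    (hub : ∀ y ∈ xs, y ≤ b) : xs.foldl max acc = max acc b := by
  apply le_antisymm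
  · rcases PySem.List.foldl_max_mem xs acc with h | h
    · rw [h]; exact le_max_left _ _
    · exact le_trans (hub _ h) (le_max_right _ _)
  · rcases PySem.List.le_foldl_max xs acc with ⟨h1, h2⟩
    exact max_le h1 (h2 _ hmem)

theorem fold_gt (a : List Int) (i : Nat) (acc b : Int)
    (hmem : ∃ j ∈ gtIdx a i, gv a i * distI i j = b)
    (hub : ∀ j ∈ gtIdx a i, gv a i * distI i j ≤ b) :
    ((gtIdx a i).map (fun j => gv a i * distI i j)).foldl max acc = max acc b := by
  apply foldl_max_eq
  · rcases hmem with ⟨j, hj, rfl⟩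
    exact List.mem_map.2 ⟨j, hj, rfl⟩
  · intro y hy
    rcases List.mem_map.1 hy with ⟨j, hj, rfl⟩
    exact hub j hj

-- the entries solve_alt reads, in spec form
theorem pm_entry (a : List Int) (k : Nat) (hk : k < a.length) :
    (scanlMax a (a.getD 0 0)).getD k 0 = pmv a k := scanlMax_getD a _ k hk

theorem sm_entry (a : List Int) (k : Nat) (hk : k < a.length) :
    ((scanlMax a.reverse (a.reverse.getD 0 0)).reverse).getD k 0 = smv a k := by
  have hlen : (scanlMax a.reverse (a.reverse.getD 0 0)).length = a.length := by
    rw [scanlMax_length, List.length_reverse]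
  rw [getD_reverse _ _ _ (by rw [hlen]; omega)]
  rw [hlen]
  rw [scanlMax_getD _ _ _ (by rw [List.length_reverse]; omega)]
  unfold smv
  congr 2
  omega

theorem B_eq_norm (a : List Int) (h : a ≠ []) :
    solve_alt a = (List.range a.length).foldl
      (fun acc i => ((gtIdx a i).map (fun j => gv a i * distI i j)).foldl max acc)
      (gv a 0) := by
  have hn : 0 < a.length := List.length_pos_of_ne_nil h
  unfold solve_alt
  rw [foldl_pm0, foldl_pm0]
  dsimp only
  apply PySem.List.foldl_congr_mem
  intro acc i hi
  rw [List.mem_range] at hi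
  rw [sm_entry a 0 hn]
  by_cases htop : a.getD i 0 ≥ smv a 0
  · rw [if_pos htop]
    have hempty : gtIdx a i = [] := by
      unfold gtIdx
      rw [List.filter_eq_nil_iff]
      intro j hj
      rw [List.mem_range] at hj
      simp only [decide_eq_true_eq]
      unfold gv
      have h1 := smv_bound a 0 j (Nat.zero_le j) hj
      omega
    rw [hempty]
    simp
  · rw [if_neg htop]
    have hxlt : a.getD i 0 < smv a 0 := by omega
    have hex : ∃ k, k < a.length ∧ a.getD i 0 < a.getD k 0 := by
      rcases smv_attain a 0 hn with ⟨k, _, hkn, hkeq⟩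
      exact ⟨k, hkn, by omega⟩
    by_cases hx0 : a.getD i 0 ≥ 0
    · rw [if_pos hx0]
      -- binary search on the prefix maxima
      set P := fun k => @decide ((scanlMax a (a.getD 0 0)).getD k 0 > a.getD i 0) (Int.decLt _ _) with hP
      have hPt : ∀ k, k < a.length → (P k = true ↔ a.getD i 0 < pmv a k) := by
        intro k hk
        rw [hP]
        simp only [decide_eq_true_eq, gt_iff_lt]
        rw [pm_entry a k hk]
      have hmono : ∀ j k, 0 ≤ j → j ≤ k → k < a.length → P j = true → P k = true := by
        intro j k _ hjk hk hPj
        rw [hPt k hk]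
        rw [hPt j (by omega)] at hPj
        rcases pmv_attain a j (by omega) with ⟨m, hm, hmeq⟩
        have := pmv_bound a k m (by omega) hk
        omega
      obtain ⟨hr0, hrn, hrlow, hrtrue⟩ := bsLeast_spec P 0 a.length (by omega) hmono
      set r := bsLeast P 0 a.length with hrdef
      have hrltn : r < a.length := by
        by_contra hge
        rcases hex with ⟨k, hk, hkgt⟩
        have hPk : P k = true := by
          rw [hPt k hk]
          have := pmv_bound a k k (le_refl k) hk
          omega
        have := hrlow k (by omega) (by omega)
        rw [hPk] at this
        exact absurd this (by simp)
      have hrgt : a.getD i 0 < a.getD r 0 := by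
        have hPr := (hPt r hrltn).1 (hrtrue hrltn)
        rcases pmv_attain a r hrltn with ⟨m, hmr, hmeq⟩
        rcases Nat.lt_or_ge m r with hmlt | hmge
        · have hPm := hrlow m (by omega) hmlt
          have : ¬ (a.getD i 0 < pmv a m) := by
            intro hc
            rw [← hPt m (by omega)] at hc
            rw [hPm] at hc
            exact absurd hc (by simp)
          have := pmv_bound a m m (le_refl m) (by omega)
          omega
        · have : m = r := by omega
          subst this
          omega
      have hrmin : ∀ j, j < a.length → a.getD i 0 < a.getD j 0 → r ≤ j := by
        intro j hjn hjgt
        by_contra hc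
        have hPj := hrlow j (by omega) (by omega)
        have : ¬ (a.getD i 0 < pmv a j) := by
          intro hcc
          rw [← hPt j (by omega)] at hcc
          rw [hPj] at hcc
          exact absurd hcc (by simp)
        have := pmv_bound a j j (le_refl j) (by omega)
        omega
      -- binary search on the suffix maxima
      set Q := fun k => @decide (((scanlMax a.reverse (a.reverse.getD 0 0)).reverse).getD k 0 ≤ a.getD i 0) (Int.decLe _ _) with hQ
      have hQt : ∀ k, k < a.length → (Q k = true ↔ smv a k ≤ a.getD i 0) := by
        intro k hk
        rw [hQ]
        simp only [decide_eq_true_eq]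
        rw [sm_entry a k hk]
      have hmonoQ : ∀ j k, 0 ≤ j → j ≤ k → k < a.length → Q j = true → Q k = true := by
        intro j k _ hjk hk hQj
        rw [hQt k hk]
        rw [hQt j (by omega)] at hQj
        rcases smv_attain a k hk with ⟨m, hm, hmn, hmeq⟩
        have := smv_bound a j m (by omega) hmn
        omega
      obtain ⟨hs0, hsn, hslow, hstrue⟩ := bsLeast_spec Q 0 a.length (by omega) hmonoQ
      set r' := bsLeast Q 0 a.length with hsdef
      have hr'pos : 1 ≤ r' := by
        by_contra hc
        have hr'0 : r' = 0 := by omega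
        have := hstrue (by omega)
        rw [hr'0] at this
        rw [hQt 0 hn] at this
        omega
      set H := r' - 1 with hHdef
      have hHn : H < a.length := by omega
      have hHgt : a.getD i 0 < a.getD H 0 := by
        have hQH : ¬ (smv a H ≤ a.getD i 0) := by
          intro hc
          have := hslow H (by omega) (by omega)
          rw [← hQt H hHn] at hc
          rw [this] at hc
          exact absurd hc (by simp)
        rcases smv_attain a H hHn with ⟨m, hHm, hmn, hmeq⟩
        rcases Nat.lt_or_ge H m with hlt | hge
        · -- m ≥ r' : contradiction
          have hr'n : r' < a.length := by omega
          have hQm : Q m = true := hmonoQ r' m (by omega) (by omega) hmn (hstrue hr'n)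
          rw [hQt m hmn] at hQm
          have := smv_bound a m m (le_refl m) hmn
          omega
        · have : m = H := by omega
          subst this
          omega
      have hHmax : ∀ j, j < a.length → a.getD i 0 < a.getD j 0 → j ≤ H := by
        intro j hjn hjgt
        by_contra hc
        have hr'n : r' < a.length := by omega
        have hQj : Q j = true := hmonoQ r' j (by omega) (by omega) hjn (hstrue hr'n)
        rw [hQt j hjn] at hQj
        have := smv_bound a j j (le_refl j) hjn
        omega
      -- the computed furthest distance
      have hcast : ((r' : Int) - 1) = (H : Int) := by omega
      rw [hcast]
      have hloH : r ≤ H := hrmin H hHn hHgt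
      rw [ite_max]
      symm
      apply fold_gt
      · -- attainment
        rcases le_total ((H : Int) - (i : Int)) ((i : Int) - (r : Int)) with hc | hc
        · have hri : r ≤ i := by
            by_contra hcc
            omega
          refine ⟨r, (mem_gtIdx a i r).2 ⟨hrltn, hrgt⟩, ?_⟩
          unfold gv distI
          rw [max_eq_left hc]
          rw [abs_sub_comm, abs_of_nonneg (by omega : (0:Int) ≤ (i : Int) - (r : Int))]
        · have hiH : i ≤ H := by
            by_contra hcc
            omega
          refine ⟨H, (mem_gtIdx a i H).2 ⟨hHn, hHgt⟩, ?_⟩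
          unfold gv distI
          rw [max_eq_right hc]
          rw [abs_of_nonneg (by omega : (0:Int) ≤ (H : Int) - (i : Int))]
      · -- upper bound
        intro j hj
        rcases (mem_gtIdx a i j).1 hj with ⟨hjn, hjgt⟩
        unfold gv at hjgt ⊢
        unfold distI
        have hrj := hrmin j hjn hjgt
        have hjH := hHmax j hjn hjgt
        have hdist : |(j : Int) - (i : Int)| ≤ max ((i : Int) - (r : Int)) ((H : Int) - (i : Int)) := by
          rcases le_total j i with hc | hc
          · rw [abs_sub_comm, abs_of_nonneg (by omega : (0:Int) ≤ (i : Int) - (j : Int))]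
            have : (i : Int) - (j : Int) ≤ (i : Int) - (r : Int) := by omega
            exact le_trans this (le_max_left _ _)
          · rw [abs_of_nonneg (by omega : (0:Int) ≤ (j : Int) - (i : Int))]
            have : (j : Int) - (i : Int) ≤ (H : Int) - (i : Int) := by omega
            exact le_trans this (le_max_right _ _)
        exact mul_le_mul_of_nonneg_left hdist (by omega)
    · rw [if_neg hx0]
      have hpgd : (prevGreaterDist a).getD i none = pgdS a i := by
        rw [prevGreaterDist_eq]
        exact PySem.List.getD_map_range _ _ _ _ hi
      have hngd : ((prevGreaterDist a.reverse).reverse).getD i none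
          = pgdS a.reverse (a.length - 1 - i) := ngd_entry a i hi
      rw [hpgd, hngd]
      rcases hpv : pgdS a i with _ | dl <;> rcases hnv : pgdS a.reverse (a.length - 1 - i) with _ | dr <;> dsimp only
      · -- both none : impossible
        exfalso
        rcases hex with ⟨k, hkn, hkgt⟩
        have hL := (pgdS_none_iff a i).1 hpv
        have hR := (ngd_none_iff a i hi).1 hnv
        rcases Nat.lt_or_ge k i with hc | hc
        · exact absurd (hL k hc) (by omega)
        · rcases Nat.lt_or_ge i k with hc2 | hc2
          · exact absurd (hR k hc2 hkn) (by omega)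
          · have : k = i := by omega
            subst this
            omega
      · -- only right
        rcases ngd_some a i dr hi hnv with ⟨J, hiJ, hJn, hJgt, hdr, hmid⟩
        have hL := (pgdS_none_iff a i).1 hpv
        rw [ite_max]
        symm
        apply fold_gt
        · refine ⟨J, (mem_gtIdx a i J).2 ⟨hJn, hJgt⟩, ?_⟩
          unfold gv distI
          rw [hdr, abs_of_nonneg (by omega : (0:Int) ≤ (J : Int) - (i : Int))]
        · intro j hj
          rcases (mem_gtIdx a i j).1 hj with ⟨hjn, hjgt⟩
          unfold gv at hjgt ⊢
          unfold distI
          have hij : i < j := by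
            rcases Nat.lt_or_ge j i with hc | hc
            · exact absurd (hL j hc) (by omega)
            · rcases Nat.lt_or_ge i j with hc2 | hc2
              · exact hc2
              · exfalso
                have : j = i := by omega
                subst this
                omega
          have hJj : J ≤ j := by
            by_contra hc
            exact absurd (hmid j hij (by omega)) (by omega)
          have hdist : dr ≤ |(j : Int) - (i : Int)| := by
            rw [abs_of_nonneg (by omega : (0:Int) ≤ (j : Int) - (i : Int)), hdr]
            omega
          exact mul_le_mul_of_nonpos_left hdist (by omega)
      · -- only left
        rcases pgdS_some a i dl hpv with ⟨J, hJi, hJgt, hdl, hmid⟩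
        have hR := (ngd_none_iff a i hi).1 hnv
        rw [ite_max]
        symm
        apply fold_gt
        · refine ⟨J, (mem_gtIdx a i J).2 ⟨by omega, hJgt⟩, ?_⟩
          unfold gv distI
          rw [hdl, abs_sub_comm, abs_of_nonneg (by omega : (0:Int) ≤ (i : Int) - (J : Int))]
        · intro j hj
          rcases (mem_gtIdx a i j).1 hj with ⟨hjn, hjgt⟩
          unfold gv at hjgt ⊢
          unfold distI
          have hij : j < i := by
            rcases Nat.lt_or_ge j i with hc | hc
            · exact hc
            · exfalso
              rcases Nat.lt_or_ge i j with hc2 | hc2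
              · exact absurd (hR j hc2 hjn) (by omega)
              · have : j = i := by omega
                subst this
                omega
          have hjJ : j ≤ J := by
            by_contra hc
            exact absurd (hmid j (by omega) hij) (by omega)
          have hdist : dl ≤ |(j : Int) - (i : Int)| := by
            rw [abs_sub_comm, abs_of_nonneg (by omega : (0:Int) ≤ (i : Int) - (j : Int)), hdl]
            omega
          exact mul_le_mul_of_nonpos_left hdist (by omega)
      · -- both sides
        rcases pgdS_some a i dl hpv with ⟨JL, hJLi, hJLgt, hdl, hmidL⟩
        rcases ngd_some a i dr hi hnv with ⟨JR, hiJR, hJRn, hJRgt, hdr, hmidR⟩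
        rw [ite_max]
        symm
        apply fold_gt
        · rcases le_total dl dr with hc | hc
          · refine ⟨JL, (mem_gtIdx a i JL).2 ⟨by omega, hJLgt⟩, ?_⟩
            unfold gv distI
            rw [min_eq_left hc, hdl, abs_sub_comm,
              abs_of_nonneg (by omega : (0:Int) ≤ (i : Int) - (JL : Int))]
          · refine ⟨JR, (mem_gtIdx a i JR).2 ⟨hJRn, hJRgt⟩, ?_⟩
            unfold gv distI
            rw [min_eq_right hc, hdr,
              abs_of_nonneg (by omega : (0:Int) ≤ (JR : Int) - (i : Int))]
        · intro j hj
          rcases (mem_gtIdx a i j).1 hj with ⟨hjn, hjgt⟩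
          unfold gv at hjgt ⊢
          unfold distI
          have hdist : min dl dr ≤ |(j : Int) - (i : Int)| := by
            rcases Nat.lt_or_ge j i with hc | hc
            · have hjJ : j ≤ JL := by
                by_contra hcc
                exact absurd (hmidL j (by omega) hc) (by omega)
              rw [abs_sub_comm, abs_of_nonneg (by omega : (0:Int) ≤ (i : Int) - (j : Int))]
              have : dl ≤ (i : Int) - (j : Int) := by rw [hdl]; omega
              exact le_trans (min_le_left _ _) this
            · have hij : i < j := by
                rcases Nat.lt_or_ge i j with hc2 | hc2
                · exact hc2
                · exfalso
                  have : j = i := by omega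
                  subst this
                  omega
              have hJj : JR ≤ j := by
                by_contra hcc
                exact absurd (hmidR j hij (by omega)) (by omega)
              rw [abs_of_nonneg (by omega : (0:Int) ≤ (j : Int) - (i : Int))]
              have : dr ≤ (j : Int) - (i : Int) := by rw [hdr]; omega
              exact le_trans (min_le_right _ _) this
          exact mul_le_mul_of_nonpos_left hdist (by omega)

-- ===== VERDICT (by name: the statement is the Claim_ definition above) =====
theorem solve_spec : Claim_equal_solve := by
  unfold Claim_equal_solve Spec_solve
  intro a _ hpre
  rw [A_norm a, B_eq_norm a hpre]
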